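-- pv_equiv track=rewrite | github.com/kmuhan/SWP2_05_ADP_MG | ScoreFunction.py | bigstraightCalc
-- ===== SOURCE A (Python) =====
-- def bigstraightCalc(dicelist):
--     list1 = sorted(dicelist)
--     list2 = []
--     for i in list1:
--         if i not in list2:
--             list2.append(i)
--
--     if list2[0:5] == [1, 2, 3, 4,5] or list2[0:5] == [2, 3, 4, 5,6]:
--         return 40
--     else:
--         return 0
-- ===== SOURCE B (Python) =====
-- def bigstraightCalc(dicelist):
--     nums = set(dicelist)
--     if {1, 2, 3, 4, 5} <= nums or {2, 3, 4, 5, 6} <= nums: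
--         return 40
--     return 0
-- ===== Notes on version B (the rewrite author's own statement) =====
-- stated objective: simpler
-- what changed: Replaced sort + dedup loop + prefix-slice comparison by a plain set-containment test for either straight.
-- intended difference: On lists that contain a full straight but also some nonpositive value (impossible for real dice), A's lowest-five-distinct prefix no longer equals the straight so A returns 0, while B returns 40 because the straight is present, which is the intended score. — e.g. on bigstraightCalc([0, 1, 2, 3, 4, 5]): A returns 0, B returns 40
import Mathlib
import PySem

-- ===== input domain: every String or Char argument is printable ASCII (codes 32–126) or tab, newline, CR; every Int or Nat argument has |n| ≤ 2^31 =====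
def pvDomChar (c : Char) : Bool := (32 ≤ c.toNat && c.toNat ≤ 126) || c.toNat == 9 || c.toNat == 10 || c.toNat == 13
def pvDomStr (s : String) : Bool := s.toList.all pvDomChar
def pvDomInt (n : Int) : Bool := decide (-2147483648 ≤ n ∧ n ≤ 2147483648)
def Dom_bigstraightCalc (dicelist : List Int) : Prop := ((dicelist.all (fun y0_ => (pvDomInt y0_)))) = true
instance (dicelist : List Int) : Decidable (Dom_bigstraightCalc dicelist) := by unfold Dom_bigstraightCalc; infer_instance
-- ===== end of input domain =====

-- B replaces A's sort + dedup loop + prefix-slice comparison by a plain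
-- set-containment test for either straight: simpler, no sorting.

-- ===== PORT A =====
def bigstraightCalc (dicelist : List Int) : Int :=
  let list1 := PySem.List.sorted dicelist (fun x => x) false
  let list2 := list1.foldl (fun list2 i => if i ∈ list2 then list2 else list2 ++ [i]) []
  if PySem.List.slice list2 (some 0) (some 5) = [1, 2, 3, 4, 5] ∨
     PySem.List.slice list2 (some 0) (some 5) = [2, 3, 4, 5, 6] then 40 else 0

-- ===== PORT B =====
def bigstraightCalc_alt (dicelist : List Int) : Int :=
  let nums : PySem.Set Int := PySem.Set.ofList dicelist
  if PySem.Set.issubset (PySem.Set.ofList [1, 2, 3, 4, 5]) nums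
      || PySem.Set.issubset (PySem.Set.ofList [2, 3, 4, 5, 6]) nums then 40
  else 0

-- ===== PRECONDITION & SPEC =====
-- On lists that contain a full straight but also some nonpositive value (impossible for
-- real dice), A's lowest-five-distinct prefix no longer equals the straight so A returns 0,
-- while B returns 40 because the straight is present, which is the intended score.
def D_bigstraightCalc (dicelist : List Int) : Prop :=
  (∃ x ∈ dicelist, x ≤ 0) ∧
    ((∀ k ∈ ([1, 2, 3, 4, 5] : List Int), k ∈ dicelist) ∨
     (∀ k ∈ ([2, 3, 4, 5, 6] : List Int), k ∈ dicelist))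
instance (dicelist : List Int) : Decidable (D_bigstraightCalc dicelist) := by
  unfold D_bigstraightCalc; infer_instance

def Spec_bigstraightCalc (dicelist : List Int) (out : Int) : Prop :=
  ¬ D_bigstraightCalc dicelist → out = bigstraightCalc_alt dicelist
instance (dicelist : List Int) (out : Int) : Decidable (Spec_bigstraightCalc dicelist out) := by
  unfold Spec_bigstraightCalc; infer_instance

def pvDiffWitness_bigstraightCalc : List Int := [0, 1, 2, 3, 4, 5]
def pvDiffWitnessOut_bigstraightCalc : Int × Int := (0, 40)

-- ===== CLAIM (what is proved, stated in full; the proofs are below) =====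
def Claim_unchanged_bigstraightCalc : Prop :=
  ∀ (dicelist : List Int), Dom_bigstraightCalc dicelist →
    Spec_bigstraightCalc dicelist (bigstraightCalc dicelist)
def Claim_changed_bigstraightCalc : Prop :=
  Dom_bigstraightCalc (pvDiffWitness_bigstraightCalc) ∧
  D_bigstraightCalc (pvDiffWitness_bigstraightCalc) ∧
  bigstraightCalc (pvDiffWitness_bigstraightCalc) = pvDiffWitnessOut_bigstraightCalc.1 ∧
  bigstraightCalc_alt (pvDiffWitness_bigstraightCalc) = pvDiffWitnessOut_bigstraightCalc.2 ∧
  pvDiffWitnessOut_bigstraightCalc.1 ≠ pvDiffWitnessOut_bigstraightCalc.2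
def Claim_exact_bigstraightCalc : Prop :=
  ∀ (dicelist : List Int), Dom_bigstraightCalc dicelist → D_bigstraightCalc dicelist →
    bigstraightCalc dicelist ≠ bigstraightCalc_alt dicelist

-- ===== LEMMAS AND PROOFS =====

-- A's dedup loop is exactly PySem.Set.ofList.
lemma pvFoldl_dedup (ys : List Int) :
    ys.foldl (fun list2 i => if i ∈ list2 then list2 else list2 ++ [i]) [] = PySem.Set.ofList ys := by
  rw [PySem.Set.ofList_eq_foldl]
  congr 1
  funext s i
  rw [PySem.Set.add_eq_ite]

-- dedup of a ≤-sorted list is strictly increasing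
lemma pvOfList_pairwise (ys : List Int) (h : ys.Pairwise (· ≤ ·)) :
    (PySem.Set.ofList ys : List Int).Pairwise (· < ·) := by
  induction ys with
  | nil => simp [PySem.Set.ofList_nil]
  | cons y t ih =>
    rw [PySem.Set.ofList_cons]
    rcases List.pairwise_cons.mp h with ⟨hy, ht⟩
    refine List.pairwise_cons.mpr ⟨?_, ?_⟩
    · intro z hz
      rcases (PySem.Set.mem_discard _ _ _).mp hz with ⟨hz1, hz2⟩
      exact lt_of_le_of_ne (hy z ((PySem.Set.mem_ofList _ _).mp hz1)) (Ne.symm hz2)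
    · have hfil : PySem.Set.discard (PySem.Set.ofList t) y
          = (PySem.Set.ofList t).filter (fun z => !(z == y)) := rfl
      rw [hfil]
      exact (ih ht).filter _

def pvRun (a : Int) : Nat → List Int
  | 0 => []
  | n + 1 => a :: pvRun (a + 1) n

lemma mem_pvRun (n : Nat) : ∀ (a k : Int), k ∈ pvRun a n ↔ a ≤ k ∧ k < a + n := by
  induction n with
  | zero => intro a k; simp [pvRun]
  | succ n ih =>
    intro a k
    simp only [pvRun, List.mem_cons, ih (a + 1) k]
    push_cast
    omega

-- a strictly increasing list has [a, a+1, …, a+n] as its (n+1)-prefix iff it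
-- contains that run and has no element below a
lemma take_pvRun (n : Nat) : ∀ (a : Int) (L : List Int), L.Pairwise (· < ·) →
    (L.take (n + 1) = pvRun a (n + 1) ↔
      ((∀ k ∈ pvRun a (n + 1), k ∈ L) ∧ ∀ x ∈ L, a ≤ x)) := by
  induction n with
  | zero =>
    intro a L hL
    cases L with
    | nil => simp [pvRun]
    | cons h t =>
      rcases List.pairwise_cons.mp hL with ⟨hh, _⟩
      simp only [pvRun, List.take_succ_cons, List.take_zero, List.mem_cons]
      constructor
      · intro he
        have h1 : h = a := by injection he
        subst h1
        refine ⟨?_, ?_⟩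
        · intro k hk
          simp only [List.not_mem_nil, or_false] at hk
          exact Or.inl hk
        · intro x hx
          rcases hx with rfl | hx
          · exact le_refl _
          · exact le_of_lt (hh x hx)
      · rintro ⟨hk, hmin⟩
        have ha : a = h ∨ a ∈ t := hk a (Or.inl rfl)
        have hah : a ≤ h := hmin h (Or.inl rfl)
        rcases ha with rfl | hat
        · rfl
        · exact absurd hah (not_le.mpr (hh a hat))
  | succ n ih =>
    intro a L hL
    cases L with
    | nil =>
      simp only [List.take_nil, pvRun]
      constructor
      · intro he; exact absurd he (by simp)
      · rintro ⟨hk, -⟩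
        exact absurd (hk a (List.mem_cons_self)) (List.not_mem_nil)
    | cons h t =>
      rcases List.pairwise_cons.mp hL with ⟨hh, ht⟩
      have IH := ih (a + 1) t ht
      simp only [pvRun, List.take_succ_cons, List.cons.injEq] at *
      constructor
      · rintro ⟨rfl, htake⟩
        rcases IH.mp htake with ⟨hk, hmin⟩
        refine ⟨?_, ?_⟩
        · intro k hkmem
          rcases List.mem_cons.mp hkmem with rfl | hkmem
          · exact List.mem_cons_self
          · exact List.mem_cons_of_mem _ (hk k hkmem)
        · intro x hx
          rcases List.mem_cons.mp hx with rfl | hx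
          · exact le_refl _
          · linarith [hmin x hx]
      · rintro ⟨hk, hmin⟩
        have hah : a ≤ h := hmin h List.mem_cons_self
        have ha : a = h ∨ a ∈ t := List.mem_cons.mp (hk a List.mem_cons_self)
        have hha : h = a := by
          rcases ha with rfl | hat
          · rfl
          · exact absurd hah (not_le.mpr (hh a hat))
        subst hha
        refine ⟨rfl, IH.mpr ⟨?_, ?_⟩⟩
        · intro k hkmem
          have hk1 : h + 1 ≤ k := ((mem_pvRun (n + 1) (h + 1) k).mp hkmem).1
          rcases List.mem_cons.mp (hk k (List.mem_cons_of_mem _ hkmem)) with rfl | hkt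
          · omega
          · exact hkt
        · intro x hx
          have := hh x hx
          omega

-- prefix-of-dedup-of-sorted characterised on the raw dice list
lemma pvPrefix_iff (xs : List Int) (a : Int) :
    (PySem.Set.ofList (PySem.List.sorted xs (fun x => x) false) : List Int).take 5 = pvRun a 5 ↔
      ((∀ k ∈ pvRun a 5, k ∈ xs) ∧ ∀ x ∈ xs, a ≤ x) := by
  have hpair := pvOfList_pairwise (PySem.List.sorted xs (fun x => x) false)
    (PySem.List.sorted_pairwise xs (fun x => x))
  rw [take_pvRun 4 a _ hpair]
  constructor <;> rintro ⟨hk, hmin⟩ <;> refine ⟨?_, ?_⟩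
  · intro k hkm
    have := hk k hkm
    rw [PySem.Set.mem_ofList, PySem.List.mem_sorted] at this
    exact this
  · intro x hx
    exact hmin x (by rw [PySem.Set.mem_ofList, PySem.List.mem_sorted]; exact hx)
  · intro k hkm
    rw [PySem.Set.mem_ofList, PySem.List.mem_sorted]
    exact hk k hkm
  · intro x hx
    rw [PySem.Set.mem_ofList, PySem.List.mem_sorted] at hx
    exact hmin x hx

-- A returns 40 exactly when a straight is contained in the dice AND no die lies below its start
lemma pvA_char (xs : List Int) :
    bigstraightCalc xs =
      if ((∀ k ∈ ([1, 2, 3, 4, 5] : List Int), k ∈ xs) ∧ (∀ x ∈ xs, (1 : Int) ≤ x)) ∨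
         ((∀ k ∈ ([2, 3, 4, 5, 6] : List Int), k ∈ xs) ∧ (∀ x ∈ xs, (2 : Int) ≤ x)) then 40 else 0 := by
  unfold bigstraightCalc
  simp only [pvFoldl_dedup]
  set L : List Int := PySem.Set.ofList (PySem.List.sorted xs (fun x => x) false) with hLdef
  have hslice : PySem.List.slice L (some 0) (some 5) = L.take 5 := by
    rw [PySem.List.slice_zero_start]
    exact PySem.List.slice_to_natCast (xs := L) (b := 5)
  have h1 := pvPrefix_iff xs 1
  have h2 := pvPrefix_iff xs 2
  have hr1 : pvRun 1 5 = [1, 2, 3, 4, 5] := by decide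
  have hr2 : pvRun 2 5 = [2, 3, 4, 5, 6] := by decide
  rw [hr1] at h1; rw [hr2] at h2
  rw [hslice]
  by_cases hc1 : (∀ k ∈ ([1, 2, 3, 4, 5] : List Int), k ∈ xs) ∧ ∀ x ∈ xs, (1 : Int) ≤ x
  · rw [if_pos (Or.inl (h1.mpr hc1)), if_pos (Or.inl hc1)]
  · by_cases hc2 : (∀ k ∈ ([2, 3, 4, 5, 6] : List Int), k ∈ xs) ∧ ∀ x ∈ xs, (2 : Int) ≤ x
    · rw [if_pos (Or.inr (h2.mpr hc2)), if_pos (Or.inr hc2)]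
    · rw [if_neg, if_neg]
      · rintro (h | h) <;> [exact hc1 h; exact hc2 h]
      · rintro (h | h) <;> [exact hc1 (h1.mp h); exact hc2 (h2.mp h)]

-- B returns 40 exactly when a straight is contained in the dice
lemma pvB_char (xs : List Int) :
    bigstraightCalc_alt xs =
      if (∀ k ∈ ([1, 2, 3, 4, 5] : List Int), k ∈ xs) ∨
         (∀ k ∈ ([2, 3, 4, 5, 6] : List Int), k ∈ xs) then 40 else 0 := by
  unfold bigstraightCalc_alt
  have hs : ∀ r : List Int,
      PySem.Set.issubset (PySem.Set.ofList r) (PySem.Set.ofList xs) = true ↔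
        ∀ k ∈ r, k ∈ xs := by
    intro r
    rw [PySem.Set.issubset_iff]
    constructor <;> intro h k hk
    · exact (PySem.Set.mem_ofList _ _).mp (h k ((PySem.Set.mem_ofList _ _).mpr hk))
    · rw [PySem.Set.mem_ofList] at hk ⊢
      exact h k hk
  by_cases hc :
      (∀ k ∈ ([1, 2, 3, 4, 5] : List Int), k ∈ xs) ∨ (∀ k ∈ ([2, 3, 4, 5, 6] : List Int), k ∈ xs)
  · rw [if_pos hc]
    rcases hc with h | h
    · rw [if_pos]
      rw [Bool.or_eq_true]
      exact Or.inl ((hs _).mpr h)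
    · rw [if_pos]
      rw [Bool.or_eq_true]
      exact Or.inr ((hs _).mpr h)
  · rw [if_neg hc, if_neg]
    intro hb
    rcases Bool.or_eq_true_iff.mp hb with h | h
    · exact hc (Or.inl ((hs _).mp h))
    · exact hc (Or.inr ((hs _).mp h))

-- ===== VERDICT (by name: the statements are the Claim_ definitions above) =====
theorem bigstraightCalc_spec : Claim_unchanged_bigstraightCalc := by
  intro xs _ hnd
  show bigstraightCalc xs = bigstraightCalc_alt xs
  rw [pvA_char, pvB_char]
  unfold D_bigstraightCalc at hnd
  by_cases hS : (∀ k ∈ ([1, 2, 3, 4, 5] : List Int), k ∈ xs) ∨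
      (∀ k ∈ ([2, 3, 4, 5, 6] : List Int), k ∈ xs)
  · rw [if_pos hS]
    have hpos : ∀ x ∈ xs, (1 : Int) ≤ x := by
      intro x hx
      by_contra hlt
      exact hnd ⟨⟨x, hx, by omega⟩, hS⟩
    rcases hS with h1 | h2
    · rw [if_pos (Or.inl ⟨h1, hpos⟩)]
    · by_cases h1m : (1 : Int) ∈ xs
      · have h1 : ∀ k ∈ ([1, 2, 3, 4, 5] : List Int), k ∈ xs := by
          intro k hk
          simp only [List.mem_cons, List.not_mem_nil, or_false] at hk
          rcases hk with rfl | rfl | rfl | rfl | rfl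
          · exact h1m
          all_goals exact h2 _ (by simp)
        rw [if_pos (Or.inl ⟨h1, hpos⟩)]
      · have hpos2 : ∀ x ∈ xs, (2 : Int) ≤ x := by
          intro x hx
          have := hpos x hx
          rcases lt_or_ge x 2 with hlt | hge
          · have : x = 1 := by omega
            exact absurd (this ▸ hx) h1m
          · exact hge
        rw [if_pos (Or.inr ⟨h2, hpos2⟩)]
  · rw [if_neg hS, if_neg]
    rintro (⟨h, -⟩ | ⟨h, -⟩)
    · exact hS (Or.inl h)
    · exact hS (Or.inr h)

theorem bigstraightCalc_changed : Claim_changed_bigstraightCalc := by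
  unfold Claim_changed_bigstraightCalc; decide

theorem bigstraightCalc_tight : Claim_exact_bigstraightCalc := by
  intro xs _ hd
  rcases hd with ⟨⟨x, hx, hx0⟩, hS⟩
  rw [pvA_char, pvB_char, if_pos hS, if_neg]
  · intro h; exact absurd h (by decide)
  · rintro (⟨-, hmin⟩ | ⟨-, hmin⟩) <;> [skip; skip] <;>
      have := hmin x hx <;> omega
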